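-- pv_equiv track=rewrite | github.com/bschwenn/quadratic_sieve | factor.py | find_highest_power_factor
-- ===== SOURCE A (Python) =====
-- def find_highest_power_factor(n, prime):
--     k = 1
--     power = prime
--     old_power = None
--
--     while n % power == 0:
--         k += 1
--         old_power = power
--         power = prime**k
--
--     return old_power
-- ===== SOURCE B (Python) =====
-- def find_highest_power_factor(n, prime):
--     if n % prime != 0:
--         return None
--     power = prime
--     # square the divisor while its square still divides n
--     while n % (power * power) == 0:
--         power *= power
--     # power = prime**(2**i) divides n but its square does not;
--     # strip it off and recurse on the quotient for the remaining exponent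
--     rest = find_highest_power_factor(n // power, prime)
--     return power if rest is None else power * rest
-- ===== Notes on version B (the rewrite author's own statement) =====
-- stated objective: alternative
-- what changed: B uses divide-and-conquer by repeated squaring: it squares the divisor while its square still divides n (reaching prime**(2**i)), strips that power off and recurses on the quotient, instead of A's linear scan that tests prime**k for k = 1, 2, 3, ... against the full original n.
import Mathlib
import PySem

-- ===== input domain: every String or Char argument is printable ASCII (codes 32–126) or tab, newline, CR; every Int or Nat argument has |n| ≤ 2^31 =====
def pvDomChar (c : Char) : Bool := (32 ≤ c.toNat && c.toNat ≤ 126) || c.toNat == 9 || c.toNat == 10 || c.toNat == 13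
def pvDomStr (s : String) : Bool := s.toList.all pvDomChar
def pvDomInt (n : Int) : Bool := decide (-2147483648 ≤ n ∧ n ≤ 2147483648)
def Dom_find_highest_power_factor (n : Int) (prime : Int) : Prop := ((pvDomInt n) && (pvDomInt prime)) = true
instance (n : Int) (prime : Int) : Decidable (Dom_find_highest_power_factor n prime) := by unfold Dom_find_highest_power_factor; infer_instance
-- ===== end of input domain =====

-- B finds the highest power by repeated squaring of the divisor plus recursion on the
-- quotient, instead of A's one-exponent-at-a-time linear scan (objective: alternative).

-- ===== PORT A =====
-- A's while loop, fuel-bounded (fuel suffices on every input satisfying Pre_; Python diverges outside it)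
def fhpfLoopA (n prime : Int) (k : Nat) (power : Int) (old_power : Option Int) : Nat → Option Int
  | 0 => old_power
  | fuel + 1 =>
    if PySem.Int.mod n power = 0 then
      fhpfLoopA n prime (k + 1) (prime ^ (k + 1)) (some power) fuel
    else
      old_power

def find_highest_power_factor (n : Int) (prime : Int) : Option Int :=
  fhpfLoopA n prime 1 prime none (n.natAbs + 1)

-- ===== PORT B =====
-- B's inner while loop (square the divisor while its square divides n), fuel-bounded
def fhpfSq (n power : Int) : Nat → Int
  | 0 => power
  | fuel + 1 =>
    if PySem.Int.mod n (power * power) = 0 then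
      fhpfSq n (power * power) fuel
    else
      power

-- B's recursion, fuel-bounded (fuel n.natAbs suffices on every input satisfying Pre_)
def fhpfRec (prime : Int) : Nat → Int → Option Int
  | 0, _ => none
  | fuel + 1, n =>
    if PySem.Int.mod n prime ≠ 0 then none
    else
      let power := fhpfSq n prime (fuel + 1)
      match fhpfRec prime fuel (PySem.Int.floordiv n power) with
      | none => some power
      | some rest => some (power * rest)

def find_highest_power_factor_alt (n : Int) (prime : Int) : Option Int :=
  fhpfRec prime n.natAbs n

-- ===== PRECONDITION & SPEC =====
-- Pre_ excludes exactly the inputs on which the Python A does not return: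
-- prime = 0 raises ZeroDivisionError; n = 0 or prime = ±1 loops forever.
def Pre_find_highest_power_factor (n : Int) (prime : Int) : Prop :=
  n ≠ 0 ∧ prime ≠ 0 ∧ prime ≠ 1 ∧ prime ≠ -1
instance (n : Int) (prime : Int) : Decidable (Pre_find_highest_power_factor n prime) := by
  unfold Pre_find_highest_power_factor; infer_instance

def pvWitness_find_highest_power_factor : Int × Int := (12, 2)

def Spec_find_highest_power_factor (n : Int) (prime : Int) (out : Option Int) : Prop :=
  out = find_highest_power_factor_alt n prime
instance (n : Int) (prime : Int) (out : Option Int) : Decidable (Spec_find_highest_power_factor n prime out) := by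
  unfold Spec_find_highest_power_factor; infer_instance

-- ===== CLAIM (what is proved, stated in full; the proofs are below) =====
def Claim_equal_find_highest_power_factor : Prop :=
  ∀ (n : Int) (prime : Int), Dom_find_highest_power_factor n prime →
    Pre_find_highest_power_factor n prime →
    Spec_find_highest_power_factor n prime (find_highest_power_factor n prime)

-- ===== LEMMAS AND PROOFS =====

-- the exponent of the highest power of prime dividing n
def fhpfV (prime n : Int) : Nat := Nat.findGreatest (fun k => prime ^ k ∣ n) n.natAbs

theorem fhpf_kBound {prime n : Int} (hp2 : 2 ≤ prime.natAbs) (hn : n ≠ 0)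
    {k : Nat} (h : prime ^ k ∣ n) : k < n.natAbs := by
  have h1 : prime.natAbs ^ k ∣ n.natAbs := by
    rw [← Int.natAbs_pow]; exact Int.natAbs_dvd_natAbs.mpr h
  have h2 : prime.natAbs ^ k ≤ n.natAbs :=
    Nat.le_of_dvd (Int.natAbs_pos.mpr hn) h1
  have h3 : 2 ^ k ≤ prime.natAbs ^ k := Nat.pow_le_pow_left hp2 k
  have h4 : k < 2 ^ k := Nat.lt_two_pow_self
  omega

theorem fhpfV_dvd {prime n : Int} : prime ^ fhpfV prime n ∣ n := by
  exact Nat.findGreatest_spec (P := fun k => prime ^ k ∣ n) (Nat.zero_le _) (by simp)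

theorem fhpfV_not_dvd {prime n : Int} (hp2 : 2 ≤ prime.natAbs) (hn : n ≠ 0) :
    ¬ prime ^ (fhpfV prime n + 1) ∣ n := by
  intro h
  have hb : fhpfV prime n + 1 ≤ n.natAbs :=
    Nat.le_of_lt (fhpf_kBound hp2 hn (k := fhpfV prime n + 1) h)
  exact Nat.findGreatest_is_greatest (Nat.lt_succ_self _) hb h

theorem fhpfV_eq {prime n : Int} (hp2 : 2 ≤ prime.natAbs) (hn : n ≠ 0)
    {k : Nat} (h1 : prime ^ k ∣ n) (h2 : ¬ prime ^ (k + 1) ∣ n) : fhpfV prime n = k := by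
  rcases lt_trichotomy (fhpfV prime n) k with h | h | h
  · exact absurd (dvd_trans (pow_dvd_pow prime (by omega : fhpfV prime n + 1 ≤ k)) h1)
      (fhpfV_not_dvd hp2 hn)
  · exact h
  · exact absurd (dvd_trans (pow_dvd_pow prime (by omega : k + 1 ≤ fhpfV prime n)) fhpfV_dvd) h2

theorem fhpf_floordiv_mul_cancel (prime m : Int) (hp : prime ≠ 0) :
    PySem.Int.floordiv (prime * m) prime = m := by
  have h0 : PySem.Int.mod (prime * m) prime = 0 :=
    (PySem.Int.mod_eq_zero_iff_dvd _ _).mpr ⟨m, rfl⟩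
  have h := PySem.Int.floordiv_mul_add_mod (prime * m) prime
  rw [h0, add_zero] at h
  exact mul_right_cancel₀ hp (h.trans (mul_comm prime m))

-- characterisation of A's loop
theorem fhpfLoopA_char {prime n : Int} (hp2 : 2 ≤ prime.natAbs) (hn : n ≠ 0) :
    ∀ (fuel k : Nat) (old : Option Int), ¬ prime ^ (k + fuel) ∣ n →
      fhpfLoopA n prime k (prime ^ k) old fuel
        = if prime ^ k ∣ n then some (prime ^ fhpfV prime n) else old := by
  intro fuel
  induction fuel with
  | zero =>
    intro k old hnd
    rw [Nat.add_zero] at hnd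
    simp [fhpfLoopA, hnd]
  | succ f ih =>
    intro k old hnd
    by_cases h : prime ^ k ∣ n
    · rw [fhpfLoopA, if_pos ((PySem.Int.mod_eq_zero_iff_dvd _ _).mpr h)]
      rw [ih (k + 1) (some (prime ^ k)) (by
        intro hc; exact hnd (by rwa [show k + (f + 1) = k + 1 + f by omega]))]
      by_cases h2 : prime ^ (k + 1) ∣ n
      · rw [if_pos h2, if_pos h]
      · rw [if_neg h2, if_pos h, fhpfV_eq hp2 hn h h2]
    · rw [fhpfLoopA, if_neg (fun hc => h ((PySem.Int.mod_eq_zero_iff_dvd _ _).mp hc)), if_neg h]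

-- characterisation of B's squaring loop
theorem fhpfSq_char {prime n : Int} :
    ∀ (fuel e : Nat), 1 ≤ e → prime ^ e ∣ n → ¬ prime ^ (2 ^ fuel * e) ∣ n →
      ∃ e', fhpfSq n (prime ^ e) fuel = prime ^ e' ∧ 1 ≤ e' ∧
        prime ^ e' ∣ n ∧ ¬ prime ^ (2 * e') ∣ n := by
  intro fuel
  induction fuel with
  | zero =>
    intro e he h1 h2
    exact absurd h1 (by simpa using h2)
  | succ f ih =>
    intro e he h1 h2
    by_cases h : prime ^ (2 * e) ∣ n
    · have hcond : PySem.Int.mod n (prime ^ e * prime ^ e) = 0 := by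
        rw [← pow_add]
        exact (PySem.Int.mod_eq_zero_iff_dvd _ _).mpr (by rwa [show e + e = 2 * e by omega])
      rw [fhpfSq, if_pos hcond, ← pow_add, show e + e = 2 * e by omega]
      exact ih (2 * e) (by omega) h (by
        intro hc; exact h2 (by rwa [show 2 ^ (f + 1) * e = 2 ^ f * (2 * e) by ring]))
    · have hcond : ¬ PySem.Int.mod n (prime ^ e * prime ^ e) = 0 := by
        rw [← pow_add]
        intro hc
        exact h (by
          have := (PySem.Int.mod_eq_zero_iff_dvd _ _).mp hc
          rwa [show e + e = 2 * e by omega] at this)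
      rw [fhpfSq, if_neg hcond]
      exact ⟨e, rfl, he, h1, h⟩

-- characterisation of B's recursion
theorem fhpfRec_char {prime : Int} (hp2 : 2 ≤ prime.natAbs) :
    ∀ (fuel : Nat) (n : Int), n ≠ 0 → n.natAbs ≤ fuel →
      fhpfRec prime fuel n
        = if prime ∣ n then some (prime ^ fhpfV prime n) else none := by
  intro fuel
  induction fuel with
  | zero =>
    intro n hn hle
    exact absurd (Int.natAbs_eq_zero.mp (by omega)) hn
  | succ f ih =>
    intro n hn hle
    have hp0 : prime ≠ 0 := fun h => by simp [h] at hp2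
    by_cases h : prime ∣ n
    · have hguard : ¬ PySem.Int.mod n prime ≠ 0 := by
        simp [(PySem.Int.mod_eq_zero_iff_dvd n prime).mpr h]
      -- squaring loop: get power = prime ^ e'
      have hbig : ¬ prime ^ (2 ^ (f + 1) * 1) ∣ n := by
        intro hc
        have h1 := fhpf_kBound hp2 hn hc
        have h2 : f + 1 < 2 ^ (f + 1) := Nat.lt_two_pow_self
        omega
      obtain ⟨e', hpw, he1, hdvd, hnd⟩ :=
        fhpfSq_char (prime := prime) (n := n) (f + 1) 1 le_rfl (by simpa using h) hbig
      obtain ⟨q, hq⟩ := id hdvd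
      have hqfd : PySem.Int.floordiv n (prime ^ e') = q := by
        rw [hq]; exact fhpf_floordiv_mul_cancel _ q (pow_ne_zero _ hp0)
      have hq0 : q ≠ 0 := fun h0 => hn (by simp [hq, h0])
      have hpe0 : (prime : Int) ^ e' ≠ 0 := pow_ne_zero _ hp0
      -- fuel bound for the recursive call
      have hqle : q.natAbs ≤ f := by
        have h1 : n.natAbs = prime.natAbs ^ e' * q.natAbs := by
          rw [hq, Int.natAbs_mul, Int.natAbs_pow]
        have h2 : 2 ≤ prime.natAbs ^ e' := by
          calc 2 = 2 ^ 1 := by norm_num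
          _ ≤ 2 ^ e' := Nat.pow_le_pow_right (by norm_num) he1
          _ ≤ prime.natAbs ^ e' := Nat.pow_le_pow_left hp2 e'
        have h3 : 1 ≤ q.natAbs := Int.natAbs_pos.mpr hq0
        nlinarith [hle]
      rw [fhpfRec]
      rw [pow_one] at hpw
      simp only [if_neg hguard, hpw, hqfd, ih q hq0 hqle]
      by_cases h2 : prime ∣ q
      · rw [if_pos h2, if_pos h]
        show some (prime ^ e' * prime ^ fhpfV prime q) = some (prime ^ fhpfV prime n)
        rw [← pow_add]
        congr 2
        refine (fhpfV_eq hp2 hn ?_ ?_).symm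
        · rw [hq, pow_add]
          exact mul_dvd_mul_left _ fhpfV_dvd
        · intro hc
          rw [show e' + fhpfV prime q + 1 = e' + (fhpfV prime q + 1) from by omega,
            hq, pow_add] at hc
          exact fhpfV_not_dvd hp2 hq0 ((mul_dvd_mul_iff_left hpe0).mp hc)
      · rw [if_neg h2, if_pos h]
        show some (prime ^ e') = some (prime ^ fhpfV prime n)
        congr 2
        refine (fhpfV_eq hp2 hn hdvd ?_).symm
        intro hc
        rw [hq, pow_succ] at hc
        exact h2 ((mul_dvd_mul_iff_left hpe0).mp hc)
    · rw [fhpfRec]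
      rw [if_pos (fun hc => h ((PySem.Int.mod_eq_zero_iff_dvd n prime).mp hc)), if_neg h]

-- ===== VERDICT (by name: the statement is the Claim_ definition above) =====
theorem find_highest_power_factor_spec : Claim_equal_find_highest_power_factor := by
  intro n prime _ ⟨hn, hp0, hp1, hpm1⟩
  have hp2 : 2 ≤ prime.natAbs := by omega
  unfold Spec_find_highest_power_factor find_highest_power_factor find_highest_power_factor_alt
  have hA := fhpfLoopA_char hp2 hn (n.natAbs + 1) 1 none (by
    intro hc
    have := fhpf_kBound hp2 hn hc
    omega)
  rw [pow_one] at hA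
  rw [hA, fhpfRec_char hp2 n.natAbs n hn le_rfl]
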